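-- pv_equiv track=rewrite | github.com/eriknyquist/text_game_maker | text_game_maker/utils/utils.py | list_to_english
-- ===== SOURCE A (Python) =====
-- def list_to_english(strlist, conj='and'):
--     """
--     Convert a list of strings to description of the list in english.
--     For example, ['4 coins', 'an apple', 'a sausage'] would be converted to
--     '4 coins, an apple and a sausage'
--
--     :param strlist: list of strings to convert to english
--     :type strlist: str
--
--     :return: english description of the passed list
--     :rtype: str
--     """
--
--     if len(strlist) == 1:
--         return strlist[0]
--
--     msg = ""
--     for i in range(len(strlist[:-1])):
--         if i == (len(strlist) - 2):
--             delim = ' ' + conj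
--         else:
--             delim = ','
--
--         msg += '%s%s ' % (strlist[i], delim)
--
--     return msg + strlist[-1]
-- ===== SOURCE B (Python) =====
-- def list_to_english(strlist, conj='and'):
--     """Same result as A: split out the last element and join the rest uniformly."""
--     if len(strlist) == 1:
--         return strlist[0]
--     return ', '.join(strlist[:-1]) + ' ' + conj + ' ' + strlist[-1]
-- ===== Notes on version B (the rewrite author's own statement) =====
-- stated objective: idiomatic
-- what changed: Replaces the indexed loop with its per-iteration comma-vs-conjunction branch and incremental msg += by one uniform ', '.join over all but the last element plus a single concatenation of the conjunction and the last element (join avoids repeated string reallocation).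
import Mathlib
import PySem

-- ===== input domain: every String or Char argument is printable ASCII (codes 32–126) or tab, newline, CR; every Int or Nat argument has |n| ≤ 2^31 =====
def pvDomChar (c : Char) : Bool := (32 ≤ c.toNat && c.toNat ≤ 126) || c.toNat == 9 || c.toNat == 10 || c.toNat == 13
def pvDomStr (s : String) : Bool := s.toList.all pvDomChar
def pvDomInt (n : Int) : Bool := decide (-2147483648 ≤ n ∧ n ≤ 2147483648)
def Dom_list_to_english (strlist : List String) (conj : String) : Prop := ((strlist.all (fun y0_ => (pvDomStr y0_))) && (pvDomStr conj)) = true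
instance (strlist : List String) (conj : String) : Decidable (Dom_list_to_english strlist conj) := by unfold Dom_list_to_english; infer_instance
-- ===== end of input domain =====

-- B replaces A's indexed loop with its per-iteration comma-vs-conjunction branch by one uniform
-- ', '.join over all but the last element plus a single final concatenation (idiomatic; same cost).

-- ===== PORT A =====
def list_to_english (strlist : List String) (conj : String) : String :=
  if strlist.length = 1 then PySem.List.pyGetD strlist 0 ""
  else
    let msg := (PySem.List.pyRange 0 ((PySem.List.slice strlist none (some (-1))).length : Int) 1).foldl
      (fun msg i =>
        let delim := if i = (strlist.length : Int) - 2 then " " ++ conj else ","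
        msg ++ PySem.List.pyGetD strlist i "" ++ delim ++ " ") ""
    msg ++ PySem.List.pyGetD strlist (-1) ""

-- ===== PORT B =====
def list_to_english_alt (strlist : List String) (conj : String) : String :=
  if strlist.length = 1 then PySem.List.pyGetD strlist 0 ""
  else
    PySem.Str.join ", " (PySem.List.slice strlist none (some (-1)))
      ++ " " ++ conj ++ " " ++ PySem.List.pyGetD strlist (-1) ""

-- ===== PRECONDITION & SPEC =====
-- Python A raises IndexError on the empty list (strlist[-1]); B raises there too.
def Pre_list_to_english (strlist : List String) (_conj : String) : Prop := strlist ≠ []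
instance (strlist : List String) (conj : String) : Decidable (Pre_list_to_english strlist conj) := by unfold Pre_list_to_english; infer_instance
def pvWitness_list_to_english : List String × String := (["4 coins", "an apple", "a sausage"], "and")

def Spec_list_to_english (strlist : List String) (conj : String) (out : String) : Prop := out = list_to_english_alt strlist conj
instance (strlist : List String) (conj : String) (out : String) : Decidable (Spec_list_to_english strlist conj out) := by unfold Spec_list_to_english; infer_instance

-- ===== CLAIM (what is proved, stated in full; the proofs are below) =====
def Claim_equal_list_to_english : Prop := ∀ (strlist : List String) (conj : String), Dom_list_to_english strlist conj → Pre_list_to_english strlist conj → Spec_list_to_english strlist conj (list_to_english strlist conj)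

-- ===== LEMMAS AND PROOFS =====

-- ', '.join(ws ++ [v]) is the comma-only part of A's loop (the non-conjunction iterations)
theorem pv_join_concat (ws : List String) (v acc : String) :
    ws.foldl (fun a s => a ++ s ++ ", ") acc ++ v = acc ++ PySem.Str.join ", " (ws ++ [v]) := by
  induction ws generalizing acc with
  | nil => simp [PySem.Str.join, PySem.Chars.join, List.intercalate]
  | cons w ws ih =>
    simp only [List.foldl_cons, List.cons_append, ih]
    have h : PySem.Str.join ", " (w :: (ws ++ [v]))
        = w ++ ", " ++ PySem.Str.join ", " (ws ++ [v]) := by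
      apply String.toList_inj.mp
      cases ws with
      | nil => simp [PySem.Str.toList_join, PySem.Chars.join_cons_cons]
      | cons b l => simp [PySem.Str.toList_join, PySem.Chars.join_cons_cons]
    rw [h]
    simp [String.append_assoc]

-- the general (length ≥ 2) case, with the list written as ws ++ [v] ++ [z]
theorem pv_general (ws : List String) (v z conj : String) :
    list_to_english (ws ++ [v] ++ [z]) conj = list_to_english_alt (ws ++ [v] ++ [z]) conj := by
  have hne : ¬ (ws ++ [v] ++ [z]).length = 1 := by simp
  have hget : PySem.List.pyGetD (ws ++ [v] ++ [z]) (-1) "" = z := by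
    simp [PySem.List.pyGetD, PySem.List.pyGet?, PySem.List.pyIdx?]
  have hslice : PySem.List.slice (ws ++ [v] ++ [z]) none (some (-1)) = ws ++ [v] := by
    rw [PySem.List.slice_to_neg_one]; exact List.dropLast_concat
  unfold list_to_english list_to_english_alt
  rw [if_neg hne, if_neg hne, hget, hslice]
  simp only [List.length_append, List.length_cons, List.length_nil]
  have hrange : PySem.List.pyRange 0 ((ws.length + 1 + 0 : Nat) : Int) 1
      = PySem.List.pyRange 0 (ws.length : Int) 1 ++ [(ws.length : Int)] := by
    rw [show ((ws.length + 1 + 0 : Nat) : Int) = (ws.length : Int) + 1 by push_cast; ring]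
    exact PySem.List.pyRange_one_succ_right (by positivity)
  rw [hrange, List.foldl_append]
  have hL : (((ws.length + 1 + 0 + 1 : Nat)) : Int) - 2 = (ws.length : Int) := by push_cast; ring
  rw [hL]
  simp only [List.foldl_cons, List.foldl_nil]
  have hgv : PySem.List.pyGetD (ws ++ [v] ++ [z]) (ws.length : Int) "" = v := by
    rw [PySem.List.pyGetD_natCast]; simp
  rw [hgv]
  have hcongr : (PySem.List.pyRange 0 (ws.length : Int) 1).foldl
      (fun msg i =>
        let delim := if i = (ws.length : Int) then " " ++ conj else ","
        msg ++ PySem.List.pyGetD (ws ++ [v] ++ [z]) i "" ++ delim ++ " ") ""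
      = (PySem.List.pyRange 0 (ws.length : Int) 1).foldl
      (fun msg i => msg ++ PySem.List.pyGetD ws i "" ++ ", ") "" := by
    apply PySem.List.foldl_congr_mem
    intro acc x hx
    rw [PySem.List.mem_pyRange_one] at hx
    have hxne : x ≠ (ws.length : Int) := by omega
    rw [if_neg hxne]
    obtain ⟨k, hk, rfl⟩ : ∃ k : Nat, k < ws.length ∧ x = (k : Int) := ⟨x.toNat, by omega, by omega⟩
    rw [PySem.List.pyGetD_natCast, PySem.List.pyGetD_natCast]
    simp [List.getElem?_append_left hk, hk, String.append_assoc]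
  rw [hcongr]
  rw [PySem.List.foldl_pyRange_zero_pyGetD' ws "" (fun a s => a ++ s ++ ", ") ""]
  rw [pv_join_concat]
  simp [String.append_assoc]

-- ===== VERDICT (by name: the statement is the Claim_ definition above) =====
theorem list_to_english_spec : Claim_equal_list_to_english := by
  intro strlist conj _ hpre
  unfold Spec_list_to_english
  rcases List.eq_nil_or_concat strlist with h | ⟨ys, z, rfl⟩
  · exact absurd h hpre
  rcases List.eq_nil_or_concat ys with h | ⟨ws, v, rfl⟩
  · subst h; simp only [List.concat_eq_append, List.nil_append]; rfl
  simpa only [List.concat_eq_append] using pv_general ws v z conj
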